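-- pv_equiv track=rewrite | github.com/memouritsen-ui/danish-procedure-generator-unified | backend/procedurewriter/pipeline/content_generalizer.py | _deduplicate_lokal_markers
-- ===== SOURCE A (Python) =====
-- def _deduplicate_lokal_markers(content: str) -> str:
--     """Remove duplicate [LOKAL] markers in the same line."""
--     lines = content.split('\n')
--     result_lines = []
--
--     for line in lines:
--         # Count [LOKAL] occurrences
--         lokal_count = line.count('[LOKAL]')
--         if lokal_count > 1:
--             # Keep only the first one
--             first_pos = line.find('[LOKAL]')
--             # Replace all, then put back the first
--             line_without = line.replace('[LOKAL]', '')
--             line = line_without[:first_pos] + '[LOKAL]' + line_without[first_pos:]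
--         result_lines.append(line)
--
--     return '\n'.join(result_lines)
-- ===== SOURCE B (Python) =====
-- def _deduplicate_lokal_markers(content: str) -> str:
--     """Remove duplicate [LOKAL] markers in the same line (single linear scan)."""
--     out = []
--     seen = False
--     i = 0
--     n = len(content)
--     while i < n:
--         if content.startswith('[LOKAL]', i):
--             if not seen:
--                 out.append('[LOKAL]')
--                 seen = True
--             i += 7
--         else:
--             c = content[i]
--             if c == '\n':
--                 seen = False
--             out.append(c)
--             i += 1
--     return ''.join(out)
-- ===== Notes on version B (the rewrite author's own statement) =====
-- stated objective: alternative
-- what changed: Replaced the split-into-lines pipeline (per-line count/find/replace and join) by a single left-to-right scan over the whole string that keeps a seen-marker flag reset at each newline, emitting the first [LOKAL] of each line and skipping later ones.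
import Mathlib
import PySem

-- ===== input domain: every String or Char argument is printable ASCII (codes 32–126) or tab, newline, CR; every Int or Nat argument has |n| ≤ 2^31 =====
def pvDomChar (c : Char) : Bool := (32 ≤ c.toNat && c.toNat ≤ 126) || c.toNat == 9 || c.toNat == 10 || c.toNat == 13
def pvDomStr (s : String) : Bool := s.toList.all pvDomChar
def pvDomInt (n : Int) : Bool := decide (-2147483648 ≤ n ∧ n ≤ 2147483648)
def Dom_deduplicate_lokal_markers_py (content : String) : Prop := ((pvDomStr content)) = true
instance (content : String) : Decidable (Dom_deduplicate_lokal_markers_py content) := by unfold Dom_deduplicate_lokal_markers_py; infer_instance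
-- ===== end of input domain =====

-- B replaces the split/count/find/replace line pipeline with one linear scan keeping a per-line flag; alternative decomposition, same O(n) cost.

-- the literal '[LOKAL]'
def pvMarker : List Char := ['[', 'L', 'O', 'K', 'A', 'L', ']']

-- ===== PORT A =====
-- per-line body of A's loop
def pvALine (line : List Char) : List Char :=
  let lokal_count := PySem.Chars.count line pvMarker
  if lokal_count > 1 then
    let first_pos := PySem.Chars.find line pvMarker
    let line_without := PySem.Chars.replace line pvMarker []
    PySem.Chars.slice line_without none (some first_pos) ++ pvMarker
      ++ PySem.Chars.slice line_without (some first_pos) none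
  else line

def deduplicate_lokal_markers_py (content : String) : String :=
  let lines := PySem.Chars.splitOn content.toList ['\n']
  let result_lines := lines.foldl (fun acc line => acc ++ [pvALine line]) []
  String.ofList (PySem.Chars.join ['\n'] result_lines)

-- ===== PORT B =====
-- single scan; `seen` is B's seen-[LOKAL]-on-this-line flag, reset at '\n'
def pvScan : List Char → Bool → List Char
  | cs, seen =>
    if h : pvMarker.isPrefixOf cs then
      if seen then pvScan (cs.drop 7) seen
      else pvMarker ++ pvScan (cs.drop 7) true
    else
      match cs with
      | [] => []
      | c :: t => c :: pvScan t (if c = '\n' then false else seen)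
termination_by cs _ => cs.length
decreasing_by
  all_goals
    simp only [List.length_drop, List.length_cons]
  · have := (List.isPrefixOf_iff_prefix.mp h).length_le
    simp [pvMarker] at this; omega
  · have := (List.isPrefixOf_iff_prefix.mp h).length_le
    simp [pvMarker] at this; omega
  · omega

def deduplicate_lokal_markers_py_alt (content : String) : String :=
  String.ofList (pvScan content.toList false)

-- ===== PRECONDITION & SPEC =====
def Spec_deduplicate_lokal_markers_py (content : String) (out : String) : Prop := out = deduplicate_lokal_markers_py_alt content
instance (content : String) (out : String) : Decidable (Spec_deduplicate_lokal_markers_py content out) := by unfold Spec_deduplicate_lokal_markers_py; infer_instance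

-- ===== CLAIM (what is proved, stated in full; the proofs are below) =====
def Claim_equal_deduplicate_lokal_markers_py : Prop := ∀ (content : String), Dom_deduplicate_lokal_markers_py content → Spec_deduplicate_lokal_markers_py content (deduplicate_lokal_markers_py content)

-- ===== LEMMAS AND PROOFS =====

-- structural twins of the PySem fuel/accumulator loops, for the proofs only
def pvCnt (cs : List Char) : Nat :=
  if h : pvMarker.isPrefixOf cs then pvCnt (cs.drop 7) + 1
  else match cs with
    | [] => 0
    | _ :: t => pvCnt t
termination_by cs.length
decreasing_by
  · have := (List.isPrefixOf_iff_prefix.mp h).length_le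
    simp only [pvMarker, List.length_cons, List.length_nil, List.length_drop] at *
    omega
  · simp only [List.length_cons]; omega

def pvRep (cs : List Char) : List Char :=
  if h : pvMarker.isPrefixOf cs then pvRep (cs.drop 7)
  else match cs with
    | [] => []
    | c :: t => c :: pvRep t
termination_by cs.length
decreasing_by
  · have := (List.isPrefixOf_iff_prefix.mp h).length_le
    simp only [pvMarker, List.length_cons, List.length_nil, List.length_drop] at *
    omega
  · simp only [List.length_cons]; omega

def pvFnd (cs : List Char) : Option Nat :=
  if pvMarker.isPrefixOf cs then some 0
  else match cs with
    | [] => none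
    | _ :: t => (pvFnd t).map (· + 1)
termination_by cs.length
decreasing_by
  simp only [List.length_cons]; omega

def pvConsHead (p : List Char) : List (List Char) → List (List Char)
  | [] => [p]
  | x :: xs => (p ++ x) :: xs

def pvSp : List Char → List (List Char)
  | [] => [[]]
  | c :: t => if c = '\n' then [] :: pvSp t else pvConsHead [c] (pvSp t)

-- one-step unfolding lemmas
lemma pv_marker_not_prefix_nil : pvMarker.isPrefixOf ([] : List Char) = false := by decide

lemma pvCnt_nil : pvCnt [] = 0 := by rw [pvCnt]; simp [pv_marker_not_prefix_nil]

lemma pvCnt_pos {cs : List Char} (h : pvMarker.isPrefixOf cs) :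
    pvCnt cs = pvCnt (cs.drop 7) + 1 := by rw [pvCnt]; simp [h]

lemma pvCnt_cons {c : Char} {t : List Char} (h : ¬ pvMarker.isPrefixOf (c :: t)) :
    pvCnt (c :: t) = pvCnt t := by rw [pvCnt]; simp [h]

lemma pvRep_nil : pvRep [] = [] := by rw [pvRep]; simp [pv_marker_not_prefix_nil]

lemma pvRep_pos {cs : List Char} (h : pvMarker.isPrefixOf cs) :
    pvRep cs = pvRep (cs.drop 7) := by rw [pvRep]; simp [h]

lemma pvRep_cons {c : Char} {t : List Char} (h : ¬ pvMarker.isPrefixOf (c :: t)) :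
    pvRep (c :: t) = c :: pvRep t := by rw [pvRep]; simp [h]

lemma pvFnd_nil : pvFnd [] = none := by rw [pvFnd]; simp [pv_marker_not_prefix_nil]

lemma pvFnd_pos {cs : List Char} (h : pvMarker.isPrefixOf cs) : pvFnd cs = some 0 := by
  rw [pvFnd.eq_def]; simp [h]

lemma pvFnd_cons {c : Char} {t : List Char} (h : ¬ pvMarker.isPrefixOf (c :: t)) :
    pvFnd (c :: t) = (pvFnd t).map (· + 1) := by rw [pvFnd.eq_def]; simp [h]

lemma pvScan_nil (b : Bool) : pvScan [] b = [] := by rw [pvScan]; simp [pv_marker_not_prefix_nil]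

lemma pvScan_pos_true {cs : List Char} (h : pvMarker.isPrefixOf cs) :
    pvScan cs true = pvScan (cs.drop 7) true := by rw [pvScan]; simp [h]

lemma pvScan_pos_false {cs : List Char} (h : pvMarker.isPrefixOf cs) :
    pvScan cs false = pvMarker ++ pvScan (cs.drop 7) true := by rw [pvScan]; simp [h]

lemma pvScan_cons {c : Char} {t : List Char} {b : Bool} (h : ¬ pvMarker.isPrefixOf (c :: t)) :
    pvScan (c :: t) b = c :: pvScan t (if c = '\n' then false else b) := by
  rw [pvScan]; simp [h]

lemma pv_marker_decomp {cs : List Char} (h : pvMarker.isPrefixOf cs) :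
    cs = pvMarker ++ cs.drop 7 := by
  obtain ⟨t, rfl⟩ := List.isPrefixOf_iff_prefix.mp h
  rw [List.drop_left' (by decide)]

lemma pvSp_ne_nil (cs : List Char) : pvSp cs ≠ [] := by
  cases cs with
  | nil => simp [pvSp]
  | cons c t =>
    simp only [pvSp]
    split
    · simp
    · cases h : pvSp t <;> simp [pvConsHead]

-- PySem loops equal their structural twins
lemma pv_count_go_eq (fuel : Nat) : ∀ (cs : List Char) (acc : Nat), cs.length ≤ fuel →
    PySem.Chars.count.go pvMarker fuel cs acc = acc + pvCnt cs := by
  induction fuel with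
  | zero =>
    intro cs acc h
    have : cs = [] := by cases cs <;> simp_all
    subst this
    rw [PySem.Chars.count.go, pvCnt_nil]
    omega
  | succ n ih =>
    intro cs acc h
    cases cs with
    | nil => rw [PySem.Chars.count.go, pvCnt_nil] <;> omega
    | cons c t =>
      rw [PySem.Chars.count.go]
      by_cases hp : pvMarker.isPrefixOf (c :: t)
      · rw [if_pos hp]
        have hlen : (List.drop pvMarker.length (c :: t)).length ≤ n := by
          show (List.drop 7 (c :: t)).length ≤ n
          simp only [List.length_drop, List.length_cons] at *
          omega
        rw [ih _ _ hlen, pvCnt_pos hp]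
        show acc + 1 + pvCnt (List.drop 7 (c :: t)) = _
        omega
      · rw [if_neg hp, ih t acc (by simp only [List.length_cons] at h; omega), pvCnt_cons hp]

lemma pv_count_eq (l : List Char) : PySem.Chars.count l pvMarker = pvCnt l := by
  rw [PySem.Chars.count]
  rw [if_neg (by decide)]
  rw [pv_count_go_eq l.length l 0 le_rfl]
  omega

lemma pv_replace_go_eq (fuel : Nat) : ∀ (cs acc : List Char), cs.length ≤ fuel →
    PySem.Chars.replace.go pvMarker [] fuel cs acc = acc.reverse ++ pvRep cs := by
  induction fuel with
  | zero =>
    intro cs acc h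
    have : cs = [] := by cases cs <;> simp_all
    subst this
    rw [PySem.Chars.replace.go, pvRep_nil, List.append_nil]
  | succ n ih =>
    intro cs acc h
    cases cs with
    | nil => rw [PySem.Chars.replace.go, pvRep_nil, List.append_nil] <;> omega
    | cons c t =>
      rw [PySem.Chars.replace.go]
      by_cases hp : pvMarker.isPrefixOf (c :: t)
      · rw [if_pos hp]
        have hlen : (List.drop pvMarker.length (c :: t)).length ≤ n := by
          show (List.drop 7 (c :: t)).length ≤ n
          simp only [List.length_drop, List.length_cons] at *
          omega
        rw [show (([] : List Char).reverse ++ acc) = acc from rfl, ih _ _ hlen, pvRep_pos hp]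
        rfl
      · rw [if_neg hp, ih t (c :: acc) (by simp only [List.length_cons] at h; omega),
            pvRep_cons hp]
        simp

lemma pv_replace_eq (l : List Char) : PySem.Chars.replace l pvMarker [] = pvRep l := by
  rw [PySem.Chars.replace]
  rw [if_neg (by decide)]
  rw [pv_replace_go_eq l.length l [] le_rfl]
  rfl

lemma pv_find_go_eq (cs : List Char) : ∀ (k : Nat),
    PySem.Chars.find.go pvMarker cs k = (match pvFnd cs with | some i => ((k + i : Nat) : Int) | none => -1) := by
  induction cs with
  | nil =>
    intro k
    rw [PySem.Chars.find.go, pvFnd_nil, if_neg (by decide)]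
  | cons c t ih =>
    intro k
    rw [PySem.Chars.find.go]
    by_cases hp : pvMarker.isPrefixOf (c :: t)
    · rw [if_pos hp, pvFnd_pos hp]
      show (k : Int) = ((k + 0 : Nat) : Int)
      congr 1
    · rw [if_neg hp, ih (k + 1), pvFnd_cons hp]
      cases pvFnd t with
      | none => rfl
      | some i =>
        show ((k + 1 + i : Nat) : Int) = ((k + (i + 1) : Nat) : Int)
        congr 1
        omega

lemma pv_find_eq (l : List Char) :
    PySem.Chars.find l pvMarker = (match pvFnd l with | some i => (i : Int) | none => -1) := by
  rw [PySem.Chars.find, pv_find_go_eq l 0]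
  cases pvFnd l with
  | none => rfl
  | some i => show ((0 + i : Nat) : Int) = _ ; congr 1; omega

lemma pv_nl_prefix (c : Char) (t : List Char) :
    (['\n'] : List Char).isPrefixOf (c :: t) = (c == '\n') := by
  show ('\n' == c && List.isPrefixOf [] t) = (c == '\n')
  rw [List.isPrefixOf, Bool.and_true]
  by_cases h : c = '\n'
  · simp [h]
  · simp [h, Ne.symm h]

lemma pv_splitOn_go_eq (fuel : Nat) : ∀ (cs cur : List Char) (acc : List (List Char)), cs.length ≤ fuel →
    PySem.Chars.splitOn.go ['\n'] fuel cs cur acc = acc.reverse ++ pvConsHead cur.reverse (pvSp cs) := by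
  induction fuel with
  | zero =>
    intro cs cur acc h
    have : cs = [] := by cases cs <;> simp_all
    subst this
    rw [PySem.Chars.splitOn.go]
    simp [pvSp, pvConsHead]
  | succ n ih =>
    intro cs cur acc h
    cases cs with
    | nil =>
      rw [PySem.Chars.splitOn.go]
      · simp [pvSp, pvConsHead]
      · omega
    | cons c t =>
      rw [PySem.Chars.splitOn.go]
      by_cases hc : c = '\n'
      · subst hc
        rw [if_pos (by rw [pv_nl_prefix]; exact beq_self_eq_true _)]
        rw [show List.drop (['\n'] : List Char).length ('\n' :: t) = t from rfl]
        rw [ih t [] (cur.reverse :: acc) (by simp only [List.length_cons] at h; omega)]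
        simp only [pvSp, if_pos rfl, List.reverse_nil, List.reverse_cons]
        cases hsp : pvSp t with
        | nil => exact absurd hsp (pvSp_ne_nil t)
        | cons y ys => simp [pvConsHead]
      · rw [if_neg (by rw [pv_nl_prefix]; simp [hc])]
        rw [ih t (c :: cur) acc (by simp only [List.length_cons] at h; omega)]
        simp only [pvSp, hc, if_false, List.reverse_cons]
        cases hsp : pvSp t with
        | nil => exact absurd hsp (pvSp_ne_nil t)
        | cons y ys => simp [pvConsHead]

lemma pv_splitOn_eq (cs : List Char) : PySem.Chars.splitOn cs ['\n'] = pvSp cs := by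
  rw [PySem.Chars.splitOn, pv_splitOn_go_eq (cs.length + 1) cs [] [] (by omega)]
  cases hsp : pvSp cs with
  | nil => exact absurd hsp (pvSp_ne_nil cs)
  | cons y ys => simp [pvConsHead]

-- facts about pvSp
lemma pvSp_no_nl (cs : List Char) : ∀ x ∈ pvSp cs, '\n' ∉ x := by
  induction cs with
  | nil => simp [pvSp]
  | cons c t ih =>
    intro x hx
    simp only [pvSp] at hx
    by_cases hc : c = '\n'
    · rw [if_pos hc] at hx
      rcases List.mem_cons.mp hx with rfl | hx
      · simp
      · exact ih x hx
    · rw [if_neg hc] at hx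
      cases hsp : pvSp t with
      | nil =>
        rw [hsp] at hx
        simp only [pvConsHead, List.mem_singleton] at hx
        subst hx
        intro hm
        rcases List.mem_singleton.mp hm with rfl
        exact hc rfl
      | cons y ys =>
        rw [hsp] at hx
        rcases List.mem_cons.mp hx with rfl | hx
        · have hy := ih y (hsp ▸ List.mem_cons_self)
          intro hm
          rcases List.mem_cons.mp hm with he | hm
          · exact hc he.symm
          · exact hy hm
        · exact ih x (hsp ▸ List.mem_cons_of_mem _ hx)

lemma pv_intercalate_cons {sep x : List Char} {xs : List (List Char)} (h : xs ≠ []) :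
    List.intercalate sep (x :: xs) = x ++ sep ++ List.intercalate sep xs := by
  cases xs with
  | nil => exact absurd rfl h
  | cons y ys => simp [List.intercalate, List.intersperse]

lemma pv_intercalate_cons_head (sep : List Char) (c : Char) (y : List Char) (ys : List (List Char)) :
    List.intercalate sep ((c :: y) :: ys) = c :: List.intercalate sep (y :: ys) := by
  cases ys with
  | nil => simp [List.intercalate]
  | cons z zs =>
    rw [pv_intercalate_cons (List.cons_ne_nil z zs)]
    conv_rhs => rw [pv_intercalate_cons (List.cons_ne_nil z zs)]
    simp [List.cons_append, List.append_assoc]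

lemma pvSp_intercalate (cs : List Char) : List.intercalate ['\n'] (pvSp cs) = cs := by
  induction cs with
  | nil => simp [pvSp, List.intercalate]
  | cons c t ih =>
    simp only [pvSp]
    by_cases hc : c = '\n'
    · simp only [hc, if_true]
      rw [pv_intercalate_cons (pvSp_ne_nil t)]
      simp [ih]
    · simp only [hc, if_false]
      cases hsp : pvSp t with
      | nil => exact absurd hsp (pvSp_ne_nil t)
      | cons y ys =>
        rw [hsp] at ih
        simp only [pvConsHead]
        show List.intercalate ['\n'] ((c :: y) :: ys) = c :: t
        rw [pv_intercalate_cons_head, ih]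

-- marker facts
lemma pv_prefix_append_nl {l : List Char} (r : List Char)
    (h : pvMarker <+: (l ++ '\n' :: r)) : pvMarker <+: l := by
  by_cases h7 : 7 ≤ l.length
  · obtain ⟨s, hs⟩ := h
    have htake : List.take 7 (l ++ '\n' :: r) = List.take 7 l := by
      rw [List.take_append_of_le_length h7]
    have hm : List.take 7 (pvMarker ++ s) = pvMarker := by
      rw [show (7 : Nat) = pvMarker.length from rfl, List.take_left]
    rw [hs] at hm
    rw [htake] at hm
    exact hm ▸ List.take_prefix 7 l
  · exfalso
    obtain ⟨s, hs⟩ := h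
    have h1 : (l ++ '\n' :: r)[l.length]? = some '\n' := by
      rw [List.getElem?_append_right le_rfl]
      simp
    rw [← hs] at h1
    have h2 : l.length < pvMarker.length := by simp only [pvMarker]; simp; omega
    rw [List.getElem?_append_left h2] at h1
    have := List.mem_of_getElem? h1
    revert this
    decide

lemma pv_scan_append_nl : ∀ (l : List Char) (r : List Char) (b : Bool), '\n' ∉ l →
    pvScan (l ++ '\n' :: r) b = pvScan l b ++ '\n' :: pvScan r false := by
  intro l
  induction l using pvCnt.induct with
  | case1 cs hp ih =>
    intro r b hl
    obtain ⟨t, rfl⟩ := List.isPrefixOf_iff_prefix.mp hp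
    have hdrop : List.drop 7 (pvMarker ++ t) = t := List.drop_left' (by decide)
    have hdrop2 : List.drop 7 ((pvMarker ++ t) ++ '\n' :: r) = t ++ '\n' :: r := by
      rw [List.append_assoc]; exact List.drop_left' (by decide)
    have hpre2 : pvMarker.isPrefixOf ((pvMarker ++ t) ++ '\n' :: r) := by
      rw [List.append_assoc]
      exact List.isPrefixOf_iff_prefix.mpr (List.prefix_append _ _)
    have hlt : '\n' ∉ t := fun hm => hl (List.mem_append_right _ hm)
    rw [hdrop] at ih
    cases b with
    | true =>
      rw [pvScan_pos_true hp, pvScan_pos_true hpre2, hdrop2, hdrop, ih r true hlt]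
    | false =>
      rw [pvScan_pos_false hp, pvScan_pos_false hpre2, hdrop2, hdrop, ih r true hlt]
      simp [List.append_assoc]
  | case2 hp =>
    intro r b _
    have hnp : ¬ pvMarker.isPrefixOf ('\n' :: r) := by
      simp [pvMarker, List.isPrefixOf]
    rw [List.nil_append, pvScan_cons hnp, pvScan_nil]
    simp
  | case3 c t hp ih =>
    intro r b hl
    have hc : c ≠ '\n' := fun hc => hl (hc ▸ List.mem_cons_self)
    have hlt : '\n' ∉ t := fun hm => hl (List.mem_cons_of_mem _ hm)
    have hnp : ¬ pvMarker.isPrefixOf ((c :: t) ++ '\n' :: r) := by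
      intro hpp
      exact hp (List.isPrefixOf_iff_prefix.mpr
        (pv_prefix_append_nl r (List.isPrefixOf_iff_prefix.mp hpp)))
    rw [List.cons_append, pvScan_cons (by rw [← List.cons_append]; exact hnp), pvScan_cons hp]
    simp only [hc, if_false]
    rw [ih r b hlt]
    rfl

lemma pv_scan_true_eq_rep : ∀ (l : List Char), '\n' ∉ l → pvScan l true = pvRep l := by
  intro l
  induction l using pvCnt.induct with
  | case1 cs hp ih =>
    intro hl
    have hlt : '\n' ∉ List.drop 7 cs := fun hm => hl (List.mem_of_mem_drop hm)
    rw [pvScan_pos_true hp, pvRep_pos hp, ih hlt]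
  | case2 hp => intro _; rw [pvScan_nil, pvRep_nil]
  | case3 c t hp ih =>
    intro hl
    have hc : c ≠ '\n' := fun hc => hl (hc ▸ List.mem_cons_self)
    have hlt : '\n' ∉ t := fun hm => hl (List.mem_cons_of_mem _ hm)
    rw [pvScan_cons hp, pvRep_cons hp]
    simp only [hc, if_false]
    rw [ih hlt]

lemma pv_rep_of_cnt_zero : ∀ (l : List Char), pvCnt l = 0 → pvRep l = l := by
  intro l
  induction l using pvCnt.induct with
  | case1 cs hp ih =>
    intro h
    rw [pvCnt_pos hp] at h
    omega
  | case2 hp => intro _; exact pvRep_nil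
  | case3 c t hp ih =>
    intro h
    rw [pvCnt_cons hp] at h
    rw [pvRep_cons hp, ih h]

lemma pv_fnd_of_cnt_pos : ∀ (l : List Char), 1 ≤ pvCnt l → ∃ k, pvFnd l = some k := by
  intro l
  induction l using pvCnt.induct with
  | case1 cs hp ih => intro _; exact ⟨0, pvFnd_pos hp⟩
  | case2 hp => intro h; rw [pvCnt_nil] at h; omega
  | case3 c t hp ih =>
    intro h
    rw [pvCnt_cons hp] at h
    obtain ⟨k, hk⟩ := ih h
    exact ⟨k + 1, by rw [pvFnd_cons hp, hk]; rfl⟩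

lemma pv_aLine_cons {c : Char} {t : List Char} (h : ¬ pvMarker.isPrefixOf (c :: t)) :
    pvALine (c :: t) = c :: pvALine t := by
  unfold pvALine
  simp only [pv_count_eq, pv_find_eq, pv_replace_eq, PySem.Chars.slice_eq_listSlice,
    pvCnt_cons h, pvFnd_cons h, pvRep_cons h]
  by_cases hgt : pvCnt t > 1
  · simp only [hgt, if_true]
    obtain ⟨k, hk⟩ := pv_fnd_of_cnt_pos t (by omega)
    rw [hk]
    show PySem.List.slice (c :: pvRep t) none (some ((k + 1 : Nat) : Int)) ++ pvMarker ++
        PySem.List.slice (c :: pvRep t) (some ((k + 1 : Nat) : Int)) none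
      = c :: (PySem.List.slice (pvRep t) none (some ((k : Nat) : Int)) ++ pvMarker ++
        PySem.List.slice (pvRep t) (some ((k : Nat) : Int)) none)
    rw [PySem.List.slice_to _ (by positivity), PySem.List.slice_from _ (by positivity),
        PySem.List.slice_to _ (by positivity), PySem.List.slice_from _ (by positivity)]
    simp [List.take_succ_cons, List.drop_succ_cons]
  · simp [hgt]

lemma pv_scan_false_eq_aLine : ∀ (l : List Char), '\n' ∉ l → pvScan l false = pvALine l := by
  intro l
  induction l using pvCnt.induct with
  | case1 cs hp ih =>
    intro hl
    have hlt : '\n' ∉ List.drop 7 cs := fun hm => hl (List.mem_of_mem_drop hm)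
    rw [pvScan_pos_false hp, pv_scan_true_eq_rep _ hlt]
    unfold pvALine
    simp only [pv_count_eq, pv_find_eq, pv_replace_eq, PySem.Chars.slice_eq_listSlice,
      pvCnt_pos hp, pvFnd_pos hp, pvRep_pos hp]
    by_cases hz : pvCnt (List.drop 7 cs) = 0
    · simp only [hz, show ¬ ((0 : Nat) + 1 > 1) from by omega, if_false]
      rw [pv_rep_of_cnt_zero _ hz]
      exact (pv_marker_decomp hp).symm
    · simp only [show pvCnt (List.drop 7 cs) + 1 > 1 from by omega, if_true]
      show pvMarker ++ pvRep (List.drop 7 cs)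
        = PySem.List.slice (pvRep (List.drop 7 cs)) none (some ((0 : Nat) : Int)) ++ pvMarker ++
          PySem.List.slice (pvRep (List.drop 7 cs)) (some ((0 : Nat) : Int)) none
      rw [PySem.List.slice_to _ (by positivity), PySem.List.slice_from _ (by positivity)]
      simp
  | case2 hp =>
    intro _
    rw [pvScan_nil]
    unfold pvALine
    simp [pv_count_eq, pvCnt_nil]
  | case3 c t hp ih =>
    intro hl
    have hlt : '\n' ∉ t := fun hm => hl (List.mem_cons_of_mem _ hm)
    rw [pvScan_cons hp, pv_aLine_cons hp]
    simp only [ite_self]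
    rw [ih hlt]

lemma pv_scan_intercalate : ∀ (lines : List (List Char)), lines ≠ [] → (∀ x ∈ lines, '\n' ∉ x) →
    pvScan (List.intercalate ['\n'] lines) false
      = List.intercalate ['\n'] (lines.map (fun l => pvScan l false)) := by
  intro lines
  induction lines with
  | nil => intro h _; exact absurd rfl h
  | cons x xs ih =>
    intro _ hno
    cases xs with
    | nil => simp [List.intercalate]
    | cons y ys =>
      rw [pv_intercalate_cons (List.cons_ne_nil y ys)]
      have hx : '\n' ∉ x := hno x List.mem_cons_self
      rw [List.append_assoc, show (['\n'] : List Char) ++ List.intercalate ['\n'] (y :: ys)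
            = '\n' :: List.intercalate ['\n'] (y :: ys) from rfl,
          pv_scan_append_nl x _ false hx,
          ih (by simp) (fun z hz => hno z (List.mem_cons_of_mem _ hz))]
      conv_rhs => rw [List.map_cons, pv_intercalate_cons
        (show List.map (fun l => pvScan l false) (y :: ys) ≠ [] by simp)]
      simp [List.append_assoc]

-- ===== VERDICT (by name: the statement is the Claim_ definition above) =====
theorem deduplicate_lokal_markers_py_spec : Claim_equal_deduplicate_lokal_markers_py := by
  intro content _
  unfold Spec_deduplicate_lokal_markers_py deduplicate_lokal_markers_py deduplicate_lokal_markers_py_alt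
  simp only [pv_splitOn_eq, PySem.List.foldl_append_singleton_eq_map, PySem.Chars.join, List.nil_append]
  congr 1
  have h1 : List.intercalate ['\n'] ((pvSp content.toList).map pvALine)
      = List.intercalate ['\n'] ((pvSp content.toList).map (fun l => pvScan l false)) := by
    congr 1
    exact (List.map_congr_left (fun l hl => (pv_scan_false_eq_aLine l (pvSp_no_nl _ l hl)).symm))
  rw [h1, ← pv_scan_intercalate _ (pvSp_ne_nil _) (pvSp_no_nl _), pvSp_intercalate]
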